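-- pv_equiv track=rewrite | github.com/spacemeat/boilermaker | boilermaker/enums.py | determineCommonPreSuffixLengthBetweenTwo
-- ===== SOURCE A (Python) =====
-- def determineCommonPreSuffixLengthBetweenTwo(a, b, postfix, delimit = None):
--     # I'm sure there's a pythonic way
--     commonLength = 0
--     for i in range(0, min(len(a), len(b))):
--         idx = i if not postfix else -i - 1
--         if a[idx] == b[idx]:
--             commonLength += 1
--         else:
--             break
--
--     # if the prefix ends in a non-delimit, dial it back until we find one
--     # (also if postfix starts in a non-_...)
--     # TODO: Test multicharacter delimiters. I think this is wrong.
--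
--     #if commonLength < len(a):
--     if delimit:
--         if not postfix:
--             idx = commonLength - 1
--             while commonLength > 0 and a[idx:idx + len(delimit)] != delimit:
--                 commonLength -= 1
--                 idx -= 1
--         else:
--             idx = -commonLength
--             while commonLength > 0 and a[idx:idx + len(delimit)] != delimit:
--                 commonLength -= 1
--                 idx += 1
--
--     return commonLength
-- ===== SOURCE B (Python) =====
-- def determineCommonPreSuffixLengthBetweenTwo(a, b, postfix, delimit = None):
--     # single fused pass: walk the common prefix/suffix once, recording the most
--     # recent delimiter occurrence on the fly; no separate dial-back pass
--     n, m = len(a), len(b)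
--     best = 0
--     count = 0
--     for j in range(min(n, m)):
--         if postfix:
--             if a[n - 1 - j] != b[m - 1 - j]:
--                 break
--             count += 1
--             if delimit and a.startswith(delimit, n - count):
--                 best = count
--         else:
--             if a[j] != b[j]:
--                 break
--             count += 1
--             if delimit and a.startswith(delimit, j):
--                 best = j + 1
--     return best if delimit else count
-- ===== Notes on version B (the rewrite author's own statement) =====
-- stated objective: alternative
-- what changed: A runs two staged passes (count the common length, then a decrement-and-reslice while loop dialing back to a delimiter); B is one fused forward pass over the common region that records the most recent delimiter occurrence on the fly, so the dial-back pass disappears entirely.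
-- intended difference: On postfix calls with a non-empty delimiter where the dialed-back common suffix starts exactly with the delimiter at position len(a)-len(delimit) (and no delimiter occurrence starts earlier inside the common suffix), A's slice a[-c:-c+len(delimit)] has a non-negative end bound and reads the wrong (usually empty) segment, so A returns 0; B returns len(delimit), the intended dialed-back length (A's own TODO comment suspects this bug). — e.g. on determineCommonPreSuffixLengthBetweenTwo("x_", "y_", true, some "_"): A returns 0, B returns 1
import Mathlib
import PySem

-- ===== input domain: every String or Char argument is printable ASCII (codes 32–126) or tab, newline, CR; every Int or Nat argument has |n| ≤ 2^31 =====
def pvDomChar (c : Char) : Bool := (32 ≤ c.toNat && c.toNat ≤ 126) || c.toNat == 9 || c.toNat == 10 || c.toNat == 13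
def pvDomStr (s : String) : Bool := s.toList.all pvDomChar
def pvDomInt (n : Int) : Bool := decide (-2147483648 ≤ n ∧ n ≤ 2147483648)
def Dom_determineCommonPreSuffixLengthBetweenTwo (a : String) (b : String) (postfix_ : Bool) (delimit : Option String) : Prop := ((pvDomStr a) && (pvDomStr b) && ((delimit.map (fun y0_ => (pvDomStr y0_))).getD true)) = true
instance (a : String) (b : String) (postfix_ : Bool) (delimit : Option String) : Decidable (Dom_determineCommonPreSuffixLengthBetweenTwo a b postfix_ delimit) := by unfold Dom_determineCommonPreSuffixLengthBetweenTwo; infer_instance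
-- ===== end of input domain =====

-- B fuses A's two staged passes (count the common length, then a decrement-and-reslice
-- dial-back loop) into ONE forward pass over the common region that records the most
-- recent delimiter occurrence on the fly; on the postfix corner where A's negative-slice
-- arithmetic misfires (see D_ below) B returns the intended value.

-- ===== PORT A =====
-- the phase-1 counting loop: for i in range(0, min(len(a), len(b))): … break
def pvLoop1 (la lb : List Char) (postfix_ : Bool) : Nat → Nat → Nat → Nat
  | 0, _, c => c
  | f+1, i, c =>
    let idx : Int := if postfix_ then -(i : Int) - 1 else (i : Int)
    match PySem.List.pyGet? la idx, PySem.List.pyGet? lb idx with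
    | some x, some y => if x == y then pvLoop1 la lb postfix_ f (i+1) (c+1) else c
    | _, _ => c

-- prefix dial-back: while commonLength > 0 and a[idx:idx+len(delimit)] != delimit: … idx -= 1
def pvLoop2pre (la ld : List Char) : Nat → Int → Int
  | 0, _ => 0
  | c+1, idx =>
    if PySem.List.slice la (some idx) (some (idx + (ld.length : Int))) = ld then ((c : Int) + 1)
    else pvLoop2pre la ld c (idx - 1)

-- postfix dial-back: while commonLength > 0 and a[idx:idx+len(delimit)] != delimit: … idx += 1
def pvLoop2post (la ld : List Char) : Nat → Int → Int
  | 0, _ => 0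
  | c+1, idx =>
    if PySem.List.slice la (some idx) (some (idx + (ld.length : Int))) = ld then ((c : Int) + 1)
    else pvLoop2post la ld c (idx + 1)

def determineCommonPreSuffixLengthBetweenTwo (a : String) (b : String) (postfix_ : Bool) (delimit : Option String) : Int :=
  let la := a.toList
  let lb := b.toList
  let c := pvLoop1 la lb postfix_ (min la.length lb.length) 0 0
  match delimit with
  | none => (c : Int)
  | some d =>
    if d.toList = [] then (c : Int)          -- `if delimit:` — empty string is falsy
    else if postfix_ = false then pvLoop2pre la d.toList c ((c : Int) - 1)
    else pvLoop2post la d.toList c (-(c : Int))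

-- ===== PORT B =====
-- the fused loop of Source B: for j in range(min(n, m)): compare one char, count += 1,
-- `if delimit and a.startswith(delimit, pos): best = …`; break on mismatch.
-- All character indices are in range on every reached iteration (j < min n m), so
-- plain getD indexing is exact for Python's a[n-1-j] / a[j] here; a.startswith(d, pos)
-- with 0 ≤ pos is exactly d.toList.isPrefixOf (drop pos).
def pvBLoop (la lb : List Char) (pf : Bool) (delimit : Option String) : Nat → Nat → Nat → Nat → Nat × Nat
  | 0, _j, best, count => (best, count)
  | f+1, j, best, count =>
    let xi := if pf then la.length - 1 - j else j
    let yi := if pf then lb.length - 1 - j else j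
    if la.getD xi ' ' == lb.getD yi ' ' then
      let count' := count + 1
      let best' :=
        match delimit with
        | some d =>
            if (!d.toList.isEmpty) && d.toList.isPrefixOf
                (la.drop (if pf then la.length - count' else j)) then
              (if pf then count' else j + 1)
            else best
        | none => best
      pvBLoop la lb pf delimit f (j+1) best' count'
    else (best, count)

def determineCommonPreSuffixLengthBetweenTwo_alt (a : String) (b : String) (postfix_ : Bool) (delimit : Option String) : Int :=
  let la := a.toList
  let lb := b.toList
  let r := pvBLoop la lb postfix_ delimit (min la.length lb.length) 0 0 0
  -- `return best if delimit else count` — delimit truthy iff non-None and non-empty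
  match delimit with
  | none => (r.2 : Int)
  | some d => if d.toList = [] then (r.2 : Int) else (r.1 : Int)

-- ===== PRECONDITION & SPEC =====
-- with c0 the common suffix length of a and b: the delimiter is non-empty and no
-- longer than c0, a ends with it, and it occurs nowhere earlier inside that suffix
def pvDiffB (a b d : String) : Bool :=
  let la := a.toList
  let c0 := ((la.reverse.zip b.toList.reverse).takeWhile fun p => p.1 == p.2).length
  decide (d.toList ≠ [] ∧ d.toList.length ≤ c0 ∧ d.toList <:+ la ∧
          ¬ d.toList <:+: (la.drop (la.length - c0)).dropLast)

-- On postfix calls with a non-empty delimiter where the common suffix, dialed back,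
-- begins exactly with the delimiter at len(a)-len(delimit), A's slice a[-c:-c+len(delimit)]
-- reads a wrong (usually empty) segment, so A returns 0 while B returns len(delimit),
-- the intended dialed-back length (A's own TODO suspects this).
def D_determineCommonPreSuffixLengthBetweenTwo (a : String) (b : String) (postfix_ : Bool) (delimit : Option String) : Prop :=
  postfix_ = true ∧ (delimit.map (pvDiffB a b)).getD false = true
instance (a : String) (b : String) (postfix_ : Bool) (delimit : Option String) : Decidable (D_determineCommonPreSuffixLengthBetweenTwo a b postfix_ delimit) := by
  unfold D_determineCommonPreSuffixLengthBetweenTwo; infer_instance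

def Spec_determineCommonPreSuffixLengthBetweenTwo (a : String) (b : String) (postfix_ : Bool) (delimit : Option String) (out : Int) : Prop :=
  ¬ D_determineCommonPreSuffixLengthBetweenTwo a b postfix_ delimit → out = determineCommonPreSuffixLengthBetweenTwo_alt a b postfix_ delimit
instance (a : String) (b : String) (postfix_ : Bool) (delimit : Option String) (out : Int) : Decidable (Spec_determineCommonPreSuffixLengthBetweenTwo a b postfix_ delimit out) := by
  unfold Spec_determineCommonPreSuffixLengthBetweenTwo; infer_instance

def pvDiffWitness_determineCommonPreSuffixLengthBetweenTwo : String × String × Bool × Option String := ("x_", "y_", true, some "_")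
def pvDiffWitnessOut_determineCommonPreSuffixLengthBetweenTwo : Int × Int := (0, 1)

-- ===== CLAIM (what is proved, stated in full; the proofs are below) =====
def Claim_unchanged_determineCommonPreSuffixLengthBetweenTwo : Prop := ∀ (a : String) (b : String) (postfix_ : Bool) (delimit : Option String), Dom_determineCommonPreSuffixLengthBetweenTwo a b postfix_ delimit → Spec_determineCommonPreSuffixLengthBetweenTwo a b postfix_ delimit (determineCommonPreSuffixLengthBetweenTwo a b postfix_ delimit)
def Claim_changed_determineCommonPreSuffixLengthBetweenTwo : Prop := Dom_determineCommonPreSuffixLengthBetweenTwo (pvDiffWitness_determineCommonPreSuffixLengthBetweenTwo.1) (pvDiffWitness_determineCommonPreSuffixLengthBetweenTwo.2.1) (pvDiffWitness_determineCommonPreSuffixLengthBetweenTwo.2.2.1) (pvDiffWitness_determineCommonPreSuffixLengthBetweenTwo.2.2.2) ∧ D_determineCommonPreSuffixLengthBetweenTwo (pvDiffWitness_determineCommonPreSuffixLengthBetweenTwo.1) (pvDiffWitness_determineCommonPreSuffixLengthBetweenTwo.2.1) (pvDiffWitness_determineCommonPreSuffixLengthBetweenTwo.2.2.1) (pvDiffWitness_determineCommonPreSuffixLengthBetweenTwo.2.2.2)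 ∧ determineCommonPreSuffixLengthBetweenTwo (pvDiffWitness_determineCommonPreSuffixLengthBetweenTwo.1) (pvDiffWitness_determineCommonPreSuffixLengthBetweenTwo.2.1) (pvDiffWitness_determineCommonPreSuffixLengthBetweenTwo.2.2.1) (pvDiffWitness_determineCommonPreSuffixLengthBetweenTwo.2.2.2) = pvDiffWitnessOut_determineCommonPreSuffixLengthBetweenTwo.1 ∧ determineCommonPreSuffixLengthBetweenTwo_alt (pvDiffWitness_determineCommonPreSuffixLengthBetweenTwo.1) (pvDiffWitness_determineCommonPreSuffixLengthBetweenTwo.2.1) (pvDiffWitness_determineCommonPreSuffixLengthBetweenTwo.2.2.1) (pvDiffWitness_determineCommonPreSuffixLengthBetweenTwo.2.2.2) = pvDiffWitnessOut_determineCommonPreSuffixLengthBetweenTwo.2 ∧ pvDiffWitnessOut_determineCommonPreSuffixLengthBetweenTwo.1 ≠ pvDiffWitnessOut_determineCommonPreSuffixLengthBetweenTwo.2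
def Claim_exact_determineCommonPreSuffixLengthBetweenTwo : Prop := ∀ (a : String) (b : String) (postfix_ : Bool) (delimit : Option String), Dom_determineCommonPreSuffixLengthBetweenTwo a b postfix_ delimit → D_determineCommonPreSuffixLengthBetweenTwo a b postfix_ delimit → determineCommonPreSuffixLengthBetweenTwo a b postfix_ delimit ≠ determineCommonPreSuffixLengthBetweenTwo_alt a b postfix_ delimit

-- ===== LEMMAS AND PROOFS =====

-- generic downward scanner: result of a "try c, c-1, ..., 1, else 0" search
def pvScan (P : Nat → Bool) : Nat → Nat
  | 0 => 0
  | c+1 => if P c then c + 1 else pvScan P c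

-- forward scanner with an overwrite accumulator: process j = i, i+1, …, i+s-1
def pvScanF (P : Nat → Bool) : Nat → Nat → Nat → Nat
  | _i, b, 0 => b
  | i, b, s+1 => pvScanF P (i+1) (if P i then i+1 else b) s

def pvMatchLen (l : List (Char × Char)) : Nat := (l.takeWhile (fun p => p.1 == p.2)).length

def pvPairs (la lb : List Char) (postfix_ : Bool) : List (Char × Char) :=
  if postfix_ then la.reverse.zip lb.reverse else la.zip lb

-- the delimiter test Source B's loop performs at iteration j
def pvPD (la : List Char) (pf : Bool) (delimit : Option String) (j : Nat) : Bool :=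
  match delimit with
  | some d => (!d.toList.isEmpty) && d.toList.isPrefixOf (la.drop (if pf then la.length - (j+1) else j))
  | none => false

lemma pvScan_eq_zero_iff (P : Nat → Bool) (m : Nat) : pvScan P m = 0 ↔ ∀ j, j < m → P j = false := by
  induction m with
  | zero => simp [pvScan]
  | succ m ih =>
    simp only [pvScan]
    by_cases h : P m = true
    · rw [if_pos h]
      constructor
      · omega
      · intro hall; simp [hall m (Nat.lt_succ_self m)] at h
    · rw [if_neg (by simp [h]), ih]
      constructor
      · intro hall j hj
        rcases Nat.lt_succ_iff_lt_or_eq.mp hj with hj | rfl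
        · exact hall j hj
        · exact eq_false_of_ne_true h
      · intro hall j hj; exact hall j (Nat.lt_succ_of_lt hj)

lemma pvScan_spec_pos (P : Nat → Bool) (m k : Nat) (h : pvScan P m = k + 1) :
    k < m ∧ P k = true ∧ ∀ j, k < j → j < m → P j = false := by
  induction m with
  | zero => simp [pvScan] at h
  | succ m ih =>
    simp only [pvScan] at h
    by_cases hP : P m = true
    · rw [if_pos hP] at h
      obtain rfl : m = k := by omega
      exact ⟨Nat.lt_succ_self _, hP, fun j h1 h2 => by omega⟩
    · rw [if_neg (by simp [hP])] at h
      obtain ⟨h1, h2, h3⟩ := ih h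
      refine ⟨Nat.lt_succ_of_lt h1, h2, fun j hj1 hj2 => ?_⟩
      rcases Nat.lt_succ_iff_lt_or_eq.mp hj2 with hj | rfl
      · exact h3 j hj1 hj
      · exact eq_false_of_ne_true hP

lemma pvScan_eq_succ_of (P : Nat → Bool) (m k : Nat) (hk : k < m) (hP : P k = true)
    (hmax : ∀ j, k < j → j < m → P j = false) : pvScan P m = k + 1 := by
  induction m with
  | zero => omega
  | succ m ih =>
    simp only [pvScan]
    rcases Nat.lt_succ_iff_lt_or_eq.mp hk with hk' | rfl
    · rw [if_neg (by simp [hmax m hk' (Nat.lt_succ_self m)]), ih hk' (fun j h1 h2 => hmax j h1 (Nat.lt_succ_of_lt h2))]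
    · rw [if_pos hP]

lemma pvScanF_succ (P : Nat → Bool) : ∀ (s i b : Nat),
    pvScanF P i b (s+1) = if P (i+s) then i+s+1 else pvScanF P i b s := by
  intro s
  induction s with
  | zero => intro i b; simp [pvScanF]
  | succ s ih =>
    intro i b
    show pvScanF P (i+1) (if P i then i+1 else b) (s+1) = _
    rw [ih (i+1) (if P i then i+1 else b)]
    have h1 : i + 1 + s = i + (s+1) := by omega
    rw [h1]
    rfl

lemma pvScanF_eq_pvScan (P : Nat → Bool) (c : Nat) : pvScanF P 0 0 c = pvScan P c := by
  induction c with
  | zero => rfl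
  | succ c ih =>
    rw [pvScanF_succ, pvScan]
    simp only [Nat.zero_add, ih]

lemma pvMatchLen_le (l : List (Char × Char)) : pvMatchLen l ≤ l.length :=
  (List.takeWhile_sublist _).length_le

lemma pvGet_nat (x : List Char) (i : Nat) : PySem.List.pyGet? x ((i : Int)) = x[i]? := by
  simp only [PySem.List.pyGet?, PySem.List.pyIdx?]
  rw [if_pos (by positivity)]
  by_cases h : i < x.length
  · rw [if_pos (by exact_mod_cast h)]; simp
  · rw [if_neg (by exact_mod_cast h)]
    simp [List.getElem?_eq_none (show x.length ≤ i by omega)]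

lemma pvGet_negsucc (x : List Char) (i : Nat) : PySem.List.pyGet? x (-(i : Int) - 1) = x.reverse[i]? := by
  have hidx : PySem.List.pyIdx? x.length (-(i : Int) - 1) =
      if i < x.length then some (x.length - 1 - i) else none := by
    simp only [PySem.List.pyIdx?]
    rw [if_neg (by omega)]
    by_cases h : i < x.length
    · rw [if_pos (by omega), if_pos h]
      congr 1
      omega
    · rw [if_neg (by omega), if_neg h]
  simp only [PySem.List.pyGet?, hidx]
  by_cases h : i < x.length
  · rw [if_pos h]
    simp [List.getElem?_reverse h]
  · rw [if_neg h]
    simp [List.getElem?_eq_none (show x.reverse.length ≤ i by simp; omega)]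

lemma pvGet_view (x : List Char) (pf : Bool) (i : Nat) :
    PySem.List.pyGet? x (if pf then -(i : Int) - 1 else (i : Int)) = (if pf then x.reverse else x)[i]? := by
  cases pf
  · simp [pvGet_nat x i]
  · simpa using pvGet_negsucc x i

lemma pvMatchLen_drop (l : List (Char × Char)) (i : Nat) (p : Char × Char) (h : l[i]? = some (p.1, p.2)) :
    pvMatchLen (l.drop i) = if p.1 == p.2 then pvMatchLen (l.drop (i+1)) + 1 else 0 := by
  have hi : i < l.length := by
    by_contra hc
    simp [List.getElem?_eq_none (by omega : l.length ≤ i)] at h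
  rw [List.drop_eq_getElem_cons hi]
  have : l[i] = (p.1, p.2) := by
    have := List.getElem?_eq_getElem hi
    rw [h] at this; exact (Option.some_injective _ this).symm
  simp only [pvMatchLen, List.takeWhile, this]
  by_cases hp : p.1 == p.2 <;> simp [hp]

lemma pvLoop1_eq (la lb : List Char) (pf : Bool) :
    ∀ f i c, pvLoop1 la lb pf f i c = c + min f (pvMatchLen ((pvPairs la lb pf).drop i)) := by
  intro f
  induction f with
  | zero => simp [pvLoop1]
  | succ f ih =>
    intro i c
    simp only [pvLoop1, pvGet_view]
    cases hx : (if pf then la.reverse else la)[i]? with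
    | none =>
      have : (pvPairs la lb pf).drop i = [] := by
        apply List.drop_eq_nil_of_le
        have h2 : (pvPairs la lb pf).length = min la.length lb.length := by
          cases pf <;> simp [pvPairs, List.length_zip]
        have := List.getElem?_eq_none_iff.mp hx
        cases pf <;> simp_all <;> omega
      simp [this, pvMatchLen]
    | some x =>
      cases hy : (if pf then lb.reverse else lb)[i]? with
      | none =>
        have : (pvPairs la lb pf).drop i = [] := by
          apply List.drop_eq_nil_of_le
          have h2 : (pvPairs la lb pf).length = min la.length lb.length := by
            cases pf <;> simp [pvPairs, List.length_zip]
          have := List.getElem?_eq_none_iff.mp hy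
          cases pf <;> simp_all <;> omega
        simp [this, pvMatchLen]
      | some y =>
        have hxl := List.getElem?_eq_some_iff.mp hx
        have hyl := List.getElem?_eq_some_iff.mp hy
        obtain ⟨hxi, hxe⟩ := hxl
        obtain ⟨hyi, hye⟩ := hyl
        have hz : (pvPairs la lb pf)[i]? = some (x, y) := by
          cases pf <;> simp only [pvPairs, reduceIte, Bool.false_eq_true] <;>
            · rw [List.getElem?_zip_eq_some]
              constructor <;> simp_all
        have hdrop := pvMatchLen_drop _ i (x, y) hz
        by_cases hxy : x == y
        · simp only [hxy, if_true] at hdrop ⊢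
          rw [ih (i+1) (c+1), hdrop]
          omega
        · simp only [hxy, Bool.false_eq_true, if_false] at hdrop ⊢
          rw [hdrop]
          omega

lemma pvLoop1_top (la lb : List Char) (pf : Bool) :
    pvLoop1 la lb pf (min la.length lb.length) 0 0 = pvMatchLen (pvPairs la lb pf) := by
  rw [pvLoop1_eq]
  simp only [List.drop_zero, Nat.zero_add]
  have h1 : pvMatchLen (pvPairs la lb pf) ≤ min la.length lb.length := by
    have := pvMatchLen_le (pvPairs la lb pf)
    have h2 : (pvPairs la lb pf).length = min la.length lb.length := by
      cases pf <;> simp [pvPairs, List.length_zip]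
    omega
  omega

lemma pvTake_eq_iff (x ld : List Char) : x.take ld.length = ld ↔ ld <+: x := by
  constructor
  · intro h; rw [← h]; exact List.take_prefix _ _
  · intro h; exact (List.prefix_iff_eq_take.mp h).symm

lemma pvSlice_eq_iff (la ld : List Char) (j : Nat) :
    PySem.List.slice la (some (j : Int)) (some ((j : Int) + (ld.length : Int))) = ld ↔ ld <+: la.drop j := by
  rw [PySem.List.slice_natCast_add, pvTake_eq_iff]

lemma pvLoop2pre_eq_scan (la ld : List Char) :
    ∀ c : Nat, pvLoop2pre la ld c ((c : Int) - 1) =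
      (pvScan (fun j => ld.isPrefixOf (la.drop j)) c : Int) := by
  intro c
  induction c with
  | zero => simp [pvLoop2pre, pvScan]
  | succ c ih =>
    simp only [pvLoop2pre, pvScan]
    have harg : ((c + 1 : Nat) : Int) - 1 = ((c : Nat) : Int) := by push_cast; ring
    rw [harg]
    have hcond : (PySem.List.slice la (some ((c : Nat) : Int)) (some (((c : Nat) : Int) + (ld.length : Int))) = ld)
        ↔ (ld.isPrefixOf (la.drop c) = true) := by
      rw [pvSlice_eq_iff, List.isPrefixOf_iff_prefix]
    by_cases h : ld.isPrefixOf (la.drop c) = true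
    · rw [if_pos (hcond.mpr h), if_pos h]; push_cast; ring
    · rw [if_neg (fun hc => h (hcond.mp hc)), if_neg h]
      rw [ih]

lemma pvSliceNeg_eq_iff (la ld : List Char) (cc : Nat) (h1 : 1 ≤ cc) (h2 : cc ≤ la.length) (hld : ld ≠ []) :
    PySem.List.slice la (some (-(cc : Int))) (some (-(cc : Int) + (ld.length : Int))) = ld ↔
      (ld.length < cc ∧ ld <+: la.drop (la.length - cc)) := by
  have hld1 : 0 < ld.length := List.length_pos_iff.mpr hld
  have hstart : PySem.List.clampIdx la.length (-(cc : Int)) = la.length - cc := by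
    simp only [PySem.List.clampIdx]
    rw [if_pos (by omega), if_neg (by omega)]
    omega
  by_cases hdl : ld.length < cc
  · have hstop : PySem.List.clampIdx la.length (-(cc : Int) + (ld.length : Int)) = la.length - cc + ld.length := by
      simp only [PySem.List.clampIdx]
      rw [if_pos (by omega), if_neg (by omega)]
      omega
    simp only [PySem.List.slice, hstart, hstop]
    have hb : la.length - cc + ld.length - (la.length - cc) = ld.length := by omega
    rw [hb, pvTake_eq_iff]
    tauto
  · have he : PySem.List.clampIdx la.length (-(cc : Int) + (ld.length : Int)) ≤ ld.length - cc := by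
      simp only [PySem.List.clampIdx]
      rw [if_neg (by omega)]
      omega
    constructor
    · intro h
      exfalso
      have hlen : (PySem.List.slice la (some (-(cc : Int))) (some (-(cc : Int) + (ld.length : Int)))).length < ld.length := by
        simp only [PySem.List.slice, hstart, List.length_take, List.length_drop]
        omega
      rw [h] at hlen
      omega
    · rintro ⟨h3, -⟩
      omega

lemma pvLoop2post_eq_scan (la ld : List Char) (hld : ld ≠ []) :
    ∀ c : Nat, c ≤ la.length → pvLoop2post la ld c (-(c : Int)) =
      (pvScan (fun j => decide (ld.length < j + 1) && ld.isPrefixOf (la.drop (la.length - (j + 1)))) c : Int) := by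
  intro c
  induction c with
  | zero => simp [pvLoop2post, pvScan]
  | succ c ih =>
    intro hc
    simp only [pvLoop2post, pvScan]
    have hcond := pvSliceNeg_eq_iff la ld (c+1) (by omega) (by omega) hld
    have harg : -((c + 1 : Nat) : Int) + 1 = -((c : Nat) : Int) := by push_cast; ring
    by_cases h : (decide (ld.length < c + 1) && ld.isPrefixOf (la.drop (la.length - (c + 1)))) = true
    · have hP : ld.length < c + 1 ∧ ld <+: la.drop (la.length - (c+1)) := by
        simp only [Bool.and_eq_true, decide_eq_true_eq, List.isPrefixOf_iff_prefix] at h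
        exact h
      rw [if_pos (hcond.mpr hP), if_pos h]
      push_cast; ring
    · have hP : ¬ (PySem.List.slice la (some (-((c+1 : Nat) : Int))) (some (-((c+1 : Nat) : Int) + (ld.length : Int))) = ld) := by
        intro hc2
        apply h
        obtain ⟨ha, hb⟩ := hcond.mp hc2
        simp [ha, List.isPrefixOf_iff_prefix, hb]
      rw [if_neg hP, if_neg h, harg, ih (by omega)]

-- ===== characterization of B's fused loop =====

lemma pvGetD_rev (x : List Char) (j : Nat) (h : j < x.length) :
    x.reverse.getD j ' ' = x.getD (x.length - 1 - j) ' ' := by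
  rw [List.getD_eq_getElem?_getD, List.getD_eq_getElem?_getD, List.getElem?_reverse h]

lemma pvBLoop_succ (la lb : List Char) (pf : Bool) (delimit : Option String)
    (f j best : Nat) (hja : j < la.length) (hjb : j < lb.length) :
    pvBLoop la lb pf delimit (f+1) j best j =
      if (if pf then la.reverse else la).getD j ' ' == (if pf then lb.reverse else lb).getD j ' '
      then pvBLoop la lb pf delimit f (j+1) (if pvPD la pf delimit j then j+1 else best) (j+1)
      else (best, j) := by
  cases pf <;> cases delimit <;>
    simp only [pvBLoop, pvPD, Bool.if_false_right, Bool.if_true_left, if_false, if_true,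
      Bool.false_eq_true, reduceIte, ite_self] <;>
    rw [pvGetD_rev la j hja, pvGetD_rev lb j hjb]

lemma pvBLoop_eq (la lb : List Char) (pf : Bool) (delimit : Option String) :
    ∀ f j best, j + f ≤ (pvPairs la lb pf).length →
      pvBLoop la lb pf delimit f j best j =
        (pvScanF (pvPD la pf delimit) j best (min f (pvMatchLen ((pvPairs la lb pf).drop j))),
         j + min f (pvMatchLen ((pvPairs la lb pf).drop j))) := by
  intro f
  induction f with
  | zero => intro j best _h; simp [pvBLoop, pvScanF]
  | succ f ih =>
    intro j best h
    have hpl : (pvPairs la lb pf).length = min la.length lb.length := by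
      cases pf <;> simp [pvPairs, List.length_zip]
    have hja : j < la.length := by omega
    have hjb : j < lb.length := by omega
    have hua : j < (if pf then la.reverse else la).length := by cases pf <;> simp <;> omega
    have hub : j < (if pf then lb.reverse else lb).length := by cases pf <;> simp <;> omega
    set x := (if pf then la.reverse else la).getD j ' ' with hxdef
    set y := (if pf then lb.reverse else lb).getD j ' ' with hydef
    have hz : (pvPairs la lb pf)[j]? = some (x, y) := by
      have hjp : j < (pvPairs la lb pf).length := by omega
      rw [List.getElem?_eq_getElem hjp]
      have : (pvPairs la lb pf)[j] = (x, y) := by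
        cases pf with
        | false =>
          simp only [pvPairs, reduceIte, Bool.false_eq_true] at hjp ⊢
          rw [List.getElem_zip]
          simp only [hxdef, hydef, reduceIte, Bool.false_eq_true, Prod.mk.injEq]
          rw [List.getD_eq_getElem?_getD, List.getD_eq_getElem?_getD]
          simp [List.getElem?_eq_getElem hja, List.getElem?_eq_getElem hjb]
        | true =>
          simp only [pvPairs, reduceIte] at hjp ⊢
          rw [List.getElem_zip]
          simp only [hxdef, hydef, reduceIte, Prod.mk.injEq]
          rw [List.getD_eq_getElem?_getD, List.getD_eq_getElem?_getD,
              List.getElem?_reverse hja, List.getElem?_reverse hjb,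
              List.getElem?_eq_getElem (show la.length - 1 - j < la.length by omega),
              List.getElem?_eq_getElem (show lb.length - 1 - j < lb.length by omega)]
          simp [List.getElem_reverse]
      rw [this]
    have hdrop := pvMatchLen_drop _ j (x, y) hz
    rw [pvBLoop_succ la lb pf delimit f j best hja hjb]
    by_cases hxy : x == y
    · simp only [hxy, if_true] at hdrop
      rw [if_pos hxy, ih (j+1) _ (by omega), hdrop]
      have hmin : min (f+1) (pvMatchLen ((pvPairs la lb pf).drop (j+1)) + 1)
          = min f (pvMatchLen ((pvPairs la lb pf).drop (j+1))) + 1 := by omega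
      rw [hmin]
      simp only [pvScanF, Prod.mk.injEq]
      exact ⟨trivial, by omega⟩
    · simp only [hxy, Bool.false_eq_true, if_false] at hdrop
      rw [if_neg (by simpa using hxy), hdrop]
      simp [pvScanF]

lemma pvBLoop_top (la lb : List Char) (pf : Bool) (delimit : Option String) :
    pvBLoop la lb pf delimit (min la.length lb.length) 0 0 0 =
      (pvScan (pvPD la pf delimit) (pvMatchLen (pvPairs la lb pf)), pvMatchLen (pvPairs la lb pf)) := by
  have hpl : (pvPairs la lb pf).length = min la.length lb.length := by
    cases pf <;> simp [pvPairs, List.length_zip]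
  have h := pvBLoop_eq la lb pf delimit (min la.length lb.length) 0 0 (by omega)
  have hle := pvMatchLen_le (pvPairs la lb pf)
  have hm : min (min la.length lb.length) (pvMatchLen ((pvPairs la lb pf).drop 0)) = pvMatchLen (pvPairs la lb pf) := by
    rw [List.drop_zero]
    omega
  rw [hm] at h
  rw [h, pvScanF_eq_pvScan]
  simp

-- ===== the postfix scan comparison =====

lemma pvD3_bridge (la ld : List Char) (c0 : Nat) (hc0 : c0 ≤ la.length) (hl : 1 ≤ ld.length) :
    (∀ p ∈ List.range' (la.length - c0) (c0 - ld.length), ld.isPrefixOf (la.drop p) = false) ↔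
    (∀ j, ld.length ≤ j → j < c0 → ld.isPrefixOf (la.drop (la.length - (j+1))) = false) := by
  constructor
  · intro h j h1 h2
    exact h (la.length - (j+1)) (by rw [List.mem_range'_1]; omega)
  · intro h p hp
    rw [List.mem_range'_1] at hp
    have hj := h (la.length - p - 1) (by omega) (by omega)
    have harg : la.length - (la.length - p - 1 + 1) = p := by omega
    rwa [harg] at hj

lemma pvPB_le (la ld : List Char) (j : Nat) (hj : j < la.length)
    (h : ld.isPrefixOf (la.drop (la.length - (j+1))) = true) : ld.length ≤ j + 1 := by
  rw [List.isPrefixOf_iff_prefix] at h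
  have := h.length_le
  simp only [List.length_drop] at this
  omega

lemma pvPost_D (la ld : List Char) (c0 : Nat) (hld : ld ≠ []) (hc0 : c0 ≤ la.length)
    (hD1 : ld.length ≤ c0) (hD2 : ld.isPrefixOf (la.drop (la.length - ld.length)) = true)
    (hD3 : ∀ p ∈ List.range' (la.length - c0) (c0 - ld.length), ld.isPrefixOf (la.drop p) = false) :
    pvScan (fun j => decide (ld.length < j + 1) && ld.isPrefixOf (la.drop (la.length - (j + 1)))) c0 = 0 ∧
    pvScan (fun j => ld.isPrefixOf (la.drop (la.length - (j + 1)))) c0 = ld.length := by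
  have hl1 : 1 ≤ ld.length := by
    have := List.length_pos_iff.mpr hld; omega
  have hbr := (pvD3_bridge la ld c0 hc0 hl1).mp hD3
  constructor
  · rw [pvScan_eq_zero_iff]
    intro j hj
    by_cases hlt : ld.length < j + 1
    · rw [hbr j (by omega) hj]
      simp
    · simp [hlt]
  · have hk := pvScan_eq_succ_of (fun j => ld.isPrefixOf (la.drop (la.length - (j + 1)))) c0
      (ld.length - 1) (by omega)
      (by
        have harg : la.length - (ld.length - 1 + 1) = la.length - ld.length := by omega
        simpa [harg] using hD2)
      (by
        intro j hj1 hj2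
        exact hbr j (by omega) hj2)
    omega

lemma pvPost_nD (la ld : List Char) (c0 : Nat) (hld : ld ≠ []) (hc0 : c0 ≤ la.length)
    (hnD : ¬ (ld.length ≤ c0 ∧ ld.isPrefixOf (la.drop (la.length - ld.length)) = true ∧
              ∀ p ∈ List.range' (la.length - c0) (c0 - ld.length), ld.isPrefixOf (la.drop p) = false)) :
    pvScan (fun j => decide (ld.length < j + 1) && ld.isPrefixOf (la.drop (la.length - (j + 1)))) c0 =
    pvScan (fun j => ld.isPrefixOf (la.drop (la.length - (j + 1)))) c0 := by
  have hl1 : 1 ≤ ld.length := by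
    have := List.length_pos_iff.mpr hld; omega
  cases hs : pvScan (fun j => ld.isPrefixOf (la.drop (la.length - (j + 1)))) c0 with
  | zero =>
    rw [pvScan_eq_zero_iff]
    intro j hj
    have := (pvScan_eq_zero_iff _ c0).mp hs j hj
    rw [this]
    simp
  | succ k =>
    obtain ⟨h1, h2, h3⟩ := pvScan_spec_pos _ c0 k hs
    have hk1 : ld.length ≤ k + 1 := pvPB_le la ld k (by omega) h2
    by_cases heq : ld.length = k + 1
    · exfalso
      apply hnD
      refine ⟨by omega, ?_, ?_⟩
      · have harg : la.length - ld.length = la.length - (k+1) := by omega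
        rw [harg]
        exact h2
      · apply (pvD3_bridge la ld c0 hc0 hl1).mpr
        intro j hj1 hj2
        exact h3 j (by omega) hj2
    · have hlt : ld.length < k + 1 := by omega
      apply pvScan_eq_succ_of _ c0 k h1
      · simp [hlt, h2]
      · intro j hj1 hj2
        have := h3 j hj1 hj2
        simp only [this, Bool.and_false]

-- ===== D_ in its usable form =====

lemma pvSuffix_iff (la ld : List Char) (h : ld.length ≤ la.length) :
    ld <:+ la ↔ ld <+: la.drop (la.length - ld.length) := by
  rw [List.suffix_iff_eq_drop]
  constructor
  · intro he; rw [← he]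
  · intro hp
    have hlen : (la.drop (la.length - ld.length)).length = ld.length := by
      simp [List.length_drop]; omega
    exact hp.eq_of_length (by omega)

lemma pvInfix_iff_exists (x sub : List Char) : sub <:+: x ↔ ∃ i, sub <+: x.drop i := by
  rw [← PySem.Chars.isIn_iff_infix, ← PySem.Chars.exists_prefix_drop_iff_isIn]

lemma pvDiffB_iff (a b d : String) (hld : d.toList ≠ []) :
    pvDiffB a b d = true ↔
      (d.toList.length ≤ pvMatchLen (a.toList.reverse.zip b.toList.reverse) ∧
       d.toList.isPrefixOf (a.toList.drop (a.toList.length - d.toList.length)) = true ∧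
       ∀ j ∈ List.range' (a.toList.length - pvMatchLen (a.toList.reverse.zip b.toList.reverse)) (pvMatchLen (a.toList.reverse.zip b.toList.reverse) - d.toList.length),
         d.toList.isPrefixOf (a.toList.drop j) = false) := by
  have hld1 : 0 < d.toList.length := List.length_pos_iff.mpr hld
  set la := a.toList
  set ld := d.toList
  set c0 := pvMatchLen (la.reverse.zip b.toList.reverse) with hc0def
  have hc0len : c0 ≤ la.length := by
    have h1 : c0 ≤ (la.reverse.zip b.toList.reverse).length :=
      (List.takeWhile_sublist _).length_le
    simp [List.length_zip] at h1
    omega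
  set k := la.length - c0 with hkdef
  simp only [pvDiffB, decide_eq_true_eq, List.isPrefixOf_iff_prefix]
  by_cases hdc : ld.length ≤ c0
  · have hsuf := pvSuffix_iff la ld (by omega)
    have hinf : ld <:+: (la.drop k).dropLast ↔
        ∃ j ∈ List.range' k (c0 - ld.length), ld <+: la.drop j := by
      rw [List.dropLast_eq_take, pvInfix_iff_exists]
      have hxlen : (la.drop k).length = c0 := by simp [List.length_drop]; omega
      constructor
      · rintro ⟨i, hp⟩
        rw [List.drop_take] at hp
        rw [List.prefix_take_iff] at hp
        obtain ⟨hp1, hp2⟩ := hp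
        rw [List.drop_drop] at hp1
        refine ⟨k + i, ?_, hp1⟩
        rw [List.mem_range'_1]
        have hplen := hp2
        have hl1 : 0 < ld.length := hld1
        constructor
        · omega
        · have hxl : (la.drop k).length = c0 := hxlen
          omega
      · rintro ⟨j, hj, hp⟩
        rw [List.mem_range'_1] at hj
        refine ⟨j - k, ?_⟩
        rw [List.drop_take, List.prefix_take_iff, List.drop_drop]
        have harg : k + (j - k) = j := by omega
        rw [harg]
        exact ⟨hp, by omega⟩
    constructor
    · rintro ⟨-, h1, h2, h3⟩
      refine ⟨h1, hsuf.mp h2, ?_⟩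
      intro j hj
      rw [← Bool.not_eq_true, List.isPrefixOf_iff_prefix]
      intro hp
      exact h3 (hinf.mpr ⟨j, hj, hp⟩)
    · rintro ⟨h1, h2, h3⟩
      refine ⟨hld, h1, hsuf.mpr h2, ?_⟩
      intro hcon
      obtain ⟨j, hj, hp⟩ := hinf.mp hcon
      have := h3 j hj
      rw [← Bool.not_eq_true, List.isPrefixOf_iff_prefix] at this
      exact this hp
  · constructor
    · rintro ⟨-, h1, -, -⟩; exact absurd (show ld.length ≤ c0 from h1) hdc
    · rintro ⟨h1, -, -⟩; exact absurd h1 hdc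

-- ===== assembly =====

lemma pvC0_le (la lb : List Char) (pf : Bool) : pvMatchLen (pvPairs la lb pf) ≤ la.length := by
  have := pvMatchLen_le (pvPairs la lb pf)
  have h2 : (pvPairs la lb pf).length = min la.length lb.length := by
    cases pf <;> simp [pvPairs, List.length_zip]
  omega

lemma pvPD_some (la ld0 : List Char) (pf : Bool) (d : String) (hd : d.toList = ld0) (hne : ld0 ≠ []) :
    pvPD la pf (some d) = fun j => ld0.isPrefixOf (la.drop (if pf then la.length - (j+1) else j)) := by
  funext j
  have h2 : ld0.isEmpty = false := by simp [List.isEmpty_iff, hne]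
  simp [pvPD, hd, h2]

-- ===== VERDICT (by name: the statement is the Claim_ definition above) =====
theorem determineCommonPreSuffixLengthBetweenTwo_spec : Claim_unchanged_determineCommonPreSuffixLengthBetweenTwo := by
  intro a b pf delimit _hDom hnD
  show determineCommonPreSuffixLengthBetweenTwo a b pf delimit = determineCommonPreSuffixLengthBetweenTwo_alt a b pf delimit
  simp only [determineCommonPreSuffixLengthBetweenTwo, determineCommonPreSuffixLengthBetweenTwo_alt]
  rw [pvLoop1_top, pvBLoop_top]
  cases delimit with
  | none => rfl
  | some d =>
    by_cases hd : d.toList = []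
    · simp [hd]
    · simp only [hd, reduceIte]
      rw [pvPD_some a.toList d.toList pf d rfl hd]
      cases pf with
      | false =>
        simp only [reduceIte]
        rw [pvLoop2pre_eq_scan]
        norm_num
      | true =>
        rw [if_neg (by simp)]
        rw [pvLoop2post_eq_scan a.toList d.toList hd _ (pvC0_le a.toList b.toList true)]
        have hDB : pvDiffB a b d = false := by
          by_contra hc
          have hc' : pvDiffB a b d = true := by revert hc; cases pvDiffB a b d <;> simp
          exact hnD ⟨rfl, by simp [hc']⟩
        have hnd := (pvDiffB_iff a b d hd).not.mp (by simp [hDB])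
        have hc0le : pvMatchLen (a.toList.reverse.zip b.toList.reverse) ≤ a.toList.length := by
          have h := pvC0_le a.toList b.toList true
          simpa [pvPairs] using h
        have hq := pvPost_nD a.toList d.toList (pvMatchLen (a.toList.reverse.zip b.toList.reverse)) hd hc0le hnd
        simp only [pvPairs, reduceIte]
        rw [hq]

theorem determineCommonPreSuffixLengthBetweenTwo_changed : Claim_changed_determineCommonPreSuffixLengthBetweenTwo := by
  unfold Claim_changed_determineCommonPreSuffixLengthBetweenTwo; decide

theorem determineCommonPreSuffixLengthBetweenTwo_tight : Claim_exact_determineCommonPreSuffixLengthBetweenTwo := by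
  intro a b pf delimit _hDom hD
  obtain ⟨hpf, hDB⟩ := hD
  subst hpf
  cases delimit with
  | none => simp at hDB
  | some d =>
    simp only [Option.map_some, Option.getD_some] at hDB
    have hd : d.toList ≠ [] := by
      intro hc
      simp [pvDiffB, hc] at hDB
    obtain ⟨hD1, hD2, hD3⟩ := (pvDiffB_iff a b d hd).mp hDB
    simp only [determineCommonPreSuffixLengthBetweenTwo, determineCommonPreSuffixLengthBetweenTwo_alt]
    rw [pvLoop1_top, pvBLoop_top]
    simp only [hd, reduceIte]
    rw [if_neg (by simp)]
    rw [pvPD_some a.toList d.toList true d rfl hd]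
    rw [pvLoop2post_eq_scan a.toList d.toList hd _ (pvC0_le a.toList b.toList true)]
    have hc0le : pvMatchLen (a.toList.reverse.zip b.toList.reverse) ≤ a.toList.length := by
      have h := pvC0_le a.toList b.toList true
      simpa [pvPairs] using h
    have hpost := pvPost_D a.toList d.toList (pvMatchLen (a.toList.reverse.zip b.toList.reverse)) hd
      hc0le hD1 hD2 hD3
    simp only [pvPairs, reduceIte]
    rw [hpost.1, hpost.2]
    have : 0 < d.toList.length := List.length_pos_iff.mpr hd
    omega
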